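-- pv_equiv track=rewrite | github.com/Hannibal046/UTR_NMT | data.py | build_image_lookup_table
-- ===== SOURCE A (Python) =====
-- def build_image_lookup_table(keyword_ls):
--     lookup_table = {}
--     for idx,keywords in enumerate(keyword_ls):
--         for word in keywords:
--             if word in lookup_table:
--                 lookup_table[word].append(idx)
--             else:
--                 lookup_table[word] = [idx,]
--     return lookup_table
-- ===== SOURCE B (Python) =====
-- def build_image_lookup_table(keyword_ls):
--     pairs = [(w, i) for i, ks in enumerate(keyword_ls) for w in ks]
--     words = list(dict.fromkeys(w for w, _ in pairs))
--     return {w: [i for x, i in pairs if x == w] for w in words}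
-- ===== Notes on version B (the rewrite author's own statement) =====
-- stated objective: alternative
-- what changed: Replaces the incremental dict with membership-test-and-append by a three-phase pipeline: flatten to (word, idx) pairs, take the ordered-distinct words via dict.fromkeys, then gather each word's indices with a comprehension over the flat pair list.
import Mathlib
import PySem

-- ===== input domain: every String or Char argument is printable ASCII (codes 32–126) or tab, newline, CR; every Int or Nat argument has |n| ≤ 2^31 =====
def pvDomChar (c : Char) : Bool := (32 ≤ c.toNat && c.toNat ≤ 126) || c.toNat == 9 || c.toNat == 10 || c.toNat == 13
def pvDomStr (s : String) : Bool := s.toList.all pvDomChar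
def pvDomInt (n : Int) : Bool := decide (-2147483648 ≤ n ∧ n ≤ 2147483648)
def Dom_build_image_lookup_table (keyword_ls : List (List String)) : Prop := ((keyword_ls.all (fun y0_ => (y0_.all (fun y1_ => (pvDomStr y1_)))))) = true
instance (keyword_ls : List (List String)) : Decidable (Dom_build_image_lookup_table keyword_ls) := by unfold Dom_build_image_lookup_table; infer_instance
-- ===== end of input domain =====

-- B replaces A's incremental dict construction by a flatten / ordered-dedup / gather pipeline (alternative decomposition, not claimed faster).

-- ===== PORT A =====
def build_image_lookup_table (keyword_ls : List (List String)) : List (String × List Int) :=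
  ((PySem.List.enumerate keyword_ls).foldl
      (fun lookup_table p =>
        p.2.foldl
          (fun lookup_table word =>
            if lookup_table.contains word then
              lookup_table.modify word [] (fun l => l ++ [p.1])
            else
              lookup_table.insert word [p.1])
          lookup_table)
      (PySem.Dict.mk [])).items

-- ===== PORT B =====
def build_image_lookup_table_alt (keyword_ls : List (List String)) : List (String × List Int) :=
  let pairs := (PySem.List.enumerate keyword_ls).flatMap (fun p => p.2.map (fun w => (w, p.1)))
  let words := PySem.List.dedup (pairs.map Prod.fst)
  words.map (fun w => (w, pairs.filterMap (fun q => if q.1 = w then some q.2 else none)))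

-- ===== PRECONDITION & SPEC =====
def Spec_build_image_lookup_table (keyword_ls : List (List String)) (out : List (String × List Int)) : Prop := out = build_image_lookup_table_alt keyword_ls
instance (keyword_ls : List (List String)) (out : List (String × List Int)) : Decidable (Spec_build_image_lookup_table keyword_ls out) := by unfold Spec_build_image_lookup_table; infer_instance

-- ===== CLAIM (what is proved, stated in full; the proofs are below) =====
def Claim_equal_build_image_lookup_table : Prop := ∀ (keyword_ls : List (List String)), Dom_build_image_lookup_table keyword_ls → Spec_build_image_lookup_table keyword_ls (build_image_lookup_table keyword_ls)

-- ===== LEMMAS AND PROOFS =====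

-- indices collected for one word from the flat pair list (B's gather step, abstracted over the pair list)
def gatherAt (qs : List (String × Int)) (w : String) : List Int :=
  qs.filterMap (fun q => if q.1 = w then some q.2 else none)

-- B's whole pipeline, abstracted over the flat pair list
def gather (qs : List (String × Int)) : List (String × List Int) :=
  (PySem.List.dedup (qs.map Prod.fst)).map (fun w => (w, gatherAt qs w))

-- A's per-occurrence dict update, as a single step on a (word, idx) pair
def stepA (d : PySem.Dict String (List Int)) (q : String × Int) : PySem.Dict String (List Int) :=
  if d.contains q.1 then d.modify q.1 [] (fun l => l ++ [q.2]) else d.insert q.1 [q.2]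

lemma gatherAt_append (qs : List (String × Int)) (q : String × Int) (w : String) :
    gatherAt (qs ++ [q]) w = gatherAt qs w ++ (if q.1 = w then [q.2] else []) := by
  simp only [gatherAt, List.filterMap_append]
  congr 1
  split_ifs with h <;> simp [h]

lemma gatherAt_nil_of_not_mem (qs : List (String × Int)) (w : String)
    (h : w ∉ qs.map Prod.fst) : gatherAt qs w = [] := by
  rw [gatherAt, List.filterMap_eq_nil_iff]
  intro q hq
  have : q.1 ≠ w := fun he => h (he ▸ List.mem_map_of_mem hq)
  simp [this]

lemma dedup_append_singleton {α : Type} [BEq α] (xs : List α) (x : α) :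
    PySem.List.dedup (xs ++ [x]) = PySem.Set.add (PySem.List.dedup xs) x := by
  simp [PySem.List.dedup, PySem.Set.ofList, List.foldl_append]

lemma find?_map_fst (F : String → List Int) (l : List String) (w : String) (h : w ∈ l) :
    List.find? (fun p => p.1 == w) (l.map (fun x => (x, F x))) = some (w, F w) := by
  induction l with
  | nil => cases h
  | cons a t ih =>
    by_cases hbe : (a == w) = true
    · have : a = w := by simpa using hbe
      subst this
      simp [List.find?_cons_of_pos]
    · have ha : a ≠ w := by simpa using hbe
      have hwt : w ∈ t := by
        cases h with
        | head => exact absurd rfl ha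
        | tail _ h => exact h
      rw [List.map_cons, List.find?_cons_of_neg (by simpa using hbe), ih hwt]

lemma contains_mk_gather (qs : List (String × Int)) (w : String) :
    (PySem.Dict.mk (gather qs)).contains w = true ↔ w ∈ qs.map Prod.fst := by
  simp [PySem.Dict.contains, gather, List.any_map, List.any_eq_true, Function.comp]

lemma getD_mk_gather (qs : List (String × Int)) (w : String) (h : w ∈ qs.map Prod.fst) :
    (PySem.Dict.mk (gather qs)).getD w [] = gatherAt qs w := by
  have hw : w ∈ PySem.List.dedup (qs.map Prod.fst) := (PySem.Set.mem_ofList _ _).mpr h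
  simp only [PySem.Dict.getD, PySem.Dict.get?, gather]
  rw [find?_map_fst _ _ _ hw]
  rfl

lemma stepA_gather (qs : List (String × Int)) (q : String × Int) :
    stepA (PySem.Dict.mk (gather qs)) q = PySem.Dict.mk (gather (qs ++ [q])) := by
  obtain ⟨k, i⟩ := q
  by_cases hk : k ∈ qs.map Prod.fst
  · have hc : (PySem.Dict.mk (gather qs)).contains k = true := (contains_mk_gather qs k).mpr hk
    rw [stepA, if_pos hc, PySem.Dict.modify, getD_mk_gather qs k hk,
      PySem.Dict.insert, if_pos hc]
    have hadd : PySem.List.dedup ((qs ++ [(k, i)]).map Prod.fst)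
        = PySem.List.dedup (qs.map Prod.fst) := by
      rw [List.map_append, List.map_cons, List.map_nil, dedup_append_singleton]
      have : PySem.Set.contains (PySem.List.dedup (qs.map Prod.fst)) k = true := by
        simpa [PySem.Set.contains] using hk
      simp only [PySem.Set.add]
      rw [this]
      simp
    apply congrArg PySem.Dict.mk
    conv_rhs => rw [gather, hadd]
    show List.map _ (gather qs) = _
    rw [gather, List.map_map]
    apply List.map_congr_left
    intro w _
    by_cases hw : w = k
    · subst hw
      simp [Function.comp, gatherAt_append]
    · have h1 : ¬ (w == k) = true := by simpa using hw
      have h2 : ¬ k = w := fun he => hw he.symm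
      simp [Function.comp, h1, gatherAt_append, h2]
  · have hc : (PySem.Dict.mk (gather qs)).contains k = false := by
      rw [Bool.eq_false_iff]
      intro h
      exact hk ((contains_mk_gather qs k).mp h)
    rw [stepA, if_neg (by simp [hc]), PySem.Dict.insert, if_neg (by simp [hc])]
    have hadd : PySem.List.dedup ((qs ++ [(k, i)]).map Prod.fst)
        = PySem.List.dedup (qs.map Prod.fst) ++ [k] := by
      rw [List.map_append, List.map_cons, List.map_nil, dedup_append_singleton]
      have : PySem.Set.contains (PySem.List.dedup (qs.map Prod.fst)) k = false := by
        simpa [PySem.Set.contains] using hk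
      simp only [PySem.Set.add]
      rw [this]
      simp
    apply congrArg PySem.Dict.mk
    conv_rhs => rw [gather, hadd]
    rw [List.map_append]
    show gather qs ++ _ = _
    congr 1
    · rw [gather]
      apply List.map_congr_left
      intro w hw
      have hwk : ¬ k = w := fun he => hk (he ▸ (PySem.Set.mem_ofList _ _).mp hw)
      simp [gatherAt_append, hwk]
    · simp [gatherAt_append, gatherAt_nil_of_not_mem qs k hk]

lemma foldl_stepA_gather (rest qs : List (String × Int)) :
    rest.foldl stepA (PySem.Dict.mk (gather qs)) = PySem.Dict.mk (gather (qs ++ rest)) := by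
  induction rest generalizing qs with
  | nil => simp
  | cons q t ih =>
    rw [List.foldl_cons, stepA_gather, ih (qs ++ [q]), List.append_assoc]
    rfl

-- A's nested loop over enumerate = a single fold of stepA over the flattened pair list
lemma nested_foldl_eq_flat (l : List (Int × List String)) (d : PySem.Dict String (List Int)) :
    l.foldl
      (fun lookup_table p =>
        p.2.foldl
          (fun lookup_table word =>
            if lookup_table.contains word then
              lookup_table.modify word [] (fun l => l ++ [p.1])
            else
              lookup_table.insert word [p.1])
          lookup_table) d
    = (l.flatMap (fun p => p.2.map (fun w => (w, p.1)))).foldl stepA d := by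
  induction l generalizing d with
  | nil => rfl
  | cons p t ih =>
    rw [List.foldl_cons, List.flatMap_cons, List.foldl_append, ih, List.foldl_map]
    rfl

-- ===== VERDICT (by name: the statement is the Claim_ definition above) =====
theorem build_image_lookup_table_spec : Claim_equal_build_image_lookup_table := by
  intro keyword_ls _
  unfold Spec_build_image_lookup_table build_image_lookup_table build_image_lookup_table_alt
  rw [nested_foldl_eq_flat]
  have h0 : (PySem.Dict.mk ([] : List (String × List Int)))
      = PySem.Dict.mk (gather []) := rfl
  rw [h0, foldl_stepA_gather, List.nil_append]
  rfl
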